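-- pv_equiv track=rewrite | github.com/Rajasekhar1131997/TIP102_Sessions | Week2Session2_SPSV1.py | navigate_research_station
-- ===== SOURCE A (Python) =====
-- def navigate_research_station(station_layout, observations):
--     if not station_layout:
--         return 0
--     position = {station_layout[i]: i for i in range(26)}
--     total_time = 0
--     current = 0
--     for char in observations:
--         target = position[char]
--         total_time += abs(target-current)
--         current = target
--     return total_time
-- ===== SOURCE B (Python) =====
-- def navigate_research_station(station_layout, observations):
--     if not station_layout:
--         return 0
--     position = {station_layout[i]: i for i in range(26)}
--     # Count boundary crossings: |a-b| equals the number of unit boundaries k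
--     # (between cell k and k+1) with min(a,b) <= k < max(a,b), each crossed once.
--     crossings = [0] * 25
--     current = 0
--     for char in observations:
--         target = position[char]
--         for k in range(min(current, target), max(current, target)):
--             crossings[k] += 1
--         current = target
--     return sum(crossings)
-- ===== Notes on version B (the rewrite author's own statement) =====
-- stated objective: alternative
-- what changed: Replaced summing |target-current| per move with a boundary-crossing count: a 25-slot tally array records, for each unit boundary k, how many moves cross it (incrementing slots min..max-1 per move), and the answer is the sum of the tallies.
import Mathlib
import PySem

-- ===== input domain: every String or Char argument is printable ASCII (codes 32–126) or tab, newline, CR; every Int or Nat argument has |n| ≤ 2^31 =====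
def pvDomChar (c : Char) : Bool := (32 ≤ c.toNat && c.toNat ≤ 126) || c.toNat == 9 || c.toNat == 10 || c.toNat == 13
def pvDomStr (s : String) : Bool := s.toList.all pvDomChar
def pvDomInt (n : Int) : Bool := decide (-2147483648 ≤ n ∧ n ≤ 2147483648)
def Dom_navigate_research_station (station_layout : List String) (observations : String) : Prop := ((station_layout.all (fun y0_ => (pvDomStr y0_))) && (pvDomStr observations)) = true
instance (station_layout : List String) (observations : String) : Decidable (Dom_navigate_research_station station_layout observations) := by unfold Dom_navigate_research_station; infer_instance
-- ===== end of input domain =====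

-- B counts per-boundary crossings in a 25-slot tally array instead of summing |target-current| per move (alternative algorithm, same order of cost).


-- ===== PORT A =====
-- position = {station_layout[i]: i for i in range(26)}  (an out-of-range index would raise in Python; excluded by Pre_)
def pvBuildPos (station_layout : List String) : PySem.Dict String Int :=
  (PySem.List.pyRange 0 26 1).foldl
    (fun d i => d.insert (PySem.List.pyGetD station_layout i "") i) PySem.Dict.empty

def navigate_research_station (station_layout : List String) (observations : String) : Int :=
  if station_layout = [] then 0
  else
    let position := pvBuildPos station_layout
    (observations.toList.foldl
      (fun (s : Int × Int) ch =>
        let target := position.getD (String.ofList [ch]) 0   -- KeyError excluded by Pre_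
        (s.1 + |target - s.2|, target)) (0, 0)).1

-- ===== PORT B =====
-- the inner loop 'for k in range(lo, hi): crossings[k] += 1'
def pvBump (cr : List Int) (lo hi : Int) : List Int :=
  (PySem.List.pyRange lo hi 1).foldl
    (fun c k => PySem.List.pySetD c k (PySem.List.pyGetD c k 0 + 1)) cr

def navigate_research_station_alt (station_layout : List String) (observations : String) : Int :=
  if station_layout = [] then 0
  else
    let position := pvBuildPos station_layout
    let final := observations.toList.foldl
      (fun (st : List Int × Int) ch =>
        let target := position.getD (String.ofList [ch]) 0
        (pvBump st.1 (min st.2 target) (max st.2 target), target))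
      (List.replicate 25 0, 0)
    final.1.foldl (· + ·) 0

-- ===== PRECONDITION & SPEC =====
-- Pre_ excludes exactly the inputs where Python A raises: a nonempty layout shorter than 26
-- (IndexError in the dict comprehension) and observation chars not among the first 26 layout entries (KeyError).
def Pre_navigate_research_station (station_layout : List String) (observations : String) : Prop :=
  station_layout = [] ∨
    (26 ≤ station_layout.length ∧
      (observations.toList.all fun c => (station_layout.take 26).contains (String.ofList [c])) = true)
instance (station_layout : List String) (observations : String) : Decidable (Pre_navigate_research_station station_layout observations) := by unfold Pre_navigate_research_station; infer_instance

def pvWitness_navigate_research_station : List String × String :=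
  (["a","b","c","d","e","f","g","h","i","j","k","l","m","n","o","p","q","r","s","t","u","v","w","x","y","z"], "cab")

def Spec_navigate_research_station (station_layout : List String) (observations : String) (out : Int) : Prop := out = navigate_research_station_alt station_layout observations
instance (station_layout : List String) (observations : String) (out : Int) : Decidable (Spec_navigate_research_station station_layout observations out) := by unfold Spec_navigate_research_station; infer_instance

-- ===== CLAIM (what is proved, stated in full; the proofs are below) =====
def Claim_equal_navigate_research_station : Prop := ∀ (station_layout : List String) (observations : String), Dom_navigate_research_station station_layout observations → Pre_navigate_research_station station_layout observations → Spec_navigate_research_station station_layout observations (navigate_research_station station_layout observations)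

-- ===== LEMMAS AND PROOFS =====
-- sum of |xᵢ₊₁ - xᵢ| along cur :: ys
def pairSum : Int → List Int → Int
  | _, [] => 0
  | cur, x :: xs => |x - cur| + pairSum x xs

theorem foldA_eq_pairSum (ys : List Int) :
    ∀ t cur, (ys.foldl (fun (s : Int × Int) x => (s.1 + |x - s.2|, x)) (t, cur)).1
      = t + pairSum cur ys := by
  induction ys with
  | nil => intro t cur; simp [pairSum]
  | cons x xs ih =>
      intro t cur
      simp only [List.foldl_cons, pairSum, ih]
      ring

-- every value stored in the position dict lies in [0, 26); getD's default 0 does too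
theorem pos_bound (L : List String) (s : String) :
    0 ≤ (pvBuildPos L).getD s 0 ∧ (pvBuildPos L).getD s 0 < 26 := by
  have key : ∀ (l : List Int) (d : PySem.Dict String Int),
      (∀ i ∈ l, 0 ≤ i ∧ i < 26) →
      (∀ t, 0 ≤ d.getD t 0 ∧ d.getD t 0 < 26) →
      (∀ t, 0 ≤ ((l.foldl (fun d i => d.insert (PySem.List.pyGetD L i "") i) d).getD t 0) ∧
            ((l.foldl (fun d i => d.insert (PySem.List.pyGetD L i "") i) d).getD t 0) < 26) := by
    intro l
    induction l with
    | nil => intro d _ hd t; exact hd t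
    | cons x xs ih =>
        intro d hl hd t
        refine ih _ (fun i hi => hl i (List.mem_cons_of_mem _ hi)) ?_ t
        intro t'
        rw [PySem.Dict.getD_insert]
        split
        · exact hl x (List.mem_cons_self)
        · exact hd t'
  refine key _ _ ?_ ?_ s
  · intro i hi
    have := (PySem.List.mem_pyRange_one).mp hi
    omega
  · intro t; simp [PySem.Dict.getD, PySem.Dict.get?, PySem.Dict.empty]

theorem sum_set_int (l : List Int) : ∀ (n : Nat) (v : Int), n < l.length →
    (l.set n v).sum = l.sum - l.getD n 0 + v := by
  induction l with
  | nil => intro n v h; simp at h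
  | cons x xs ih =>
      intro n v h
      cases n with
      | zero => simp [List.set]; ring
      | succ m =>
          simp only [List.set, List.sum_cons, List.getD_cons_succ]
          rw [ih m v (by simpa using h)]
          ring

theorem pvBump_spec : ∀ (c : Nat) (lo : Int) (cr : List Int), 0 ≤ lo → lo + c ≤ cr.length →
    (pvBump cr lo (lo + c)).sum = cr.sum + c ∧ (pvBump cr lo (lo + c)).length = cr.length := by
  intro c
  induction c with
  | zero =>
      intro lo cr _ _
      simp [pvBump]
  | succ m ih =>
      intro lo cr h0 hlen
      have hlt : lo < lo + ((m + 1 : Nat) : Int) := by push_cast; omega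
      unfold pvBump
      rw [PySem.List.pyRange_one_cons hlt, List.foldl_cons]
      have hidx : lo.toNat < cr.length := by omega
      have hset : PySem.List.pySetD cr lo (PySem.List.pyGetD cr lo 0 + 1)
          = cr.set lo.toNat (PySem.List.pyGetD cr lo 0 + 1) :=
        PySem.List.pySetD_of_nonneg cr _ h0
      have hget : PySem.List.pyGetD cr lo 0 = cr.getD lo.toNat 0 := by
        have hlo : lo < (cr.length : Int) := by push_cast at hlen ⊢; omega
        simp [PySem.List.pyGetD, PySem.List.pyGet?, PySem.List.pyIdx?, h0, hlo,
          List.getD_eq_getElem?_getD]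
      have hlen' : (PySem.List.pySetD cr lo (PySem.List.pyGetD cr lo 0 + 1)).length = cr.length := by
        rw [hset]; simp
      have hsum' : (PySem.List.pySetD cr lo (PySem.List.pyGetD cr lo 0 + 1)).sum = cr.sum + 1 := by
        rw [hset, sum_set_int cr lo.toNat _ hidx, hget]; ring
      have harg : lo + ((m + 1 : Nat) : Int) = (lo + 1) + (m : Int) := by push_cast; ring
      have := ih (lo + 1) (PySem.List.pySetD cr lo (PySem.List.pyGetD cr lo 0 + 1)) (by omega) (by rw [hlen']; push_cast at hlen ⊢; omega)
      rw [harg]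
      unfold pvBump at this
      constructor
      · rw [this.1, hsum']; push_cast; ring
      · rw [this.2, hlen']

theorem foldB_eq_pairSum (f : Char → Int) (hf : ∀ ch, 0 ≤ f ch ∧ f ch < 26) (l : List Char) :
    ∀ (cr : List Int) (cur : Int), cr.length = 25 → 0 ≤ cur → cur < 26 →
    ((l.foldl (fun (st : List Int × Int) ch =>
        (pvBump st.1 (min st.2 (f ch)) (max st.2 (f ch)), f ch)) (cr, cur)).1).sum
      = cr.sum + pairSum cur (l.map f)
    ∧ ((l.foldl (fun (st : List Int × Int) ch =>
        (pvBump st.1 (min st.2 (f ch)) (max st.2 (f ch)), f ch)) (cr, cur)).1).length = 25 := by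
  induction l with
  | nil => intro cr cur h _ _; simp [pairSum, h]
  | cons ch rest ih =>
      intro cr cur hlen h0 h26
      have hfch := hf ch
      have habs : max cur (f ch) = min cur (f ch) + ((max cur (f ch) - min cur (f ch)).toNat : Int) := by
        omega
      have hb := pvBump_spec (max cur (f ch) - min cur (f ch)).toNat (min cur (f ch)) cr
        (by omega) (by rw [hlen]; omega)
      rw [← habs] at hb
      simp only [List.foldl_cons, List.map_cons, pairSum]
      have := ih (pvBump cr (min cur (f ch)) (max cur (f ch))) (f ch)
        (by rw [hb.2, hlen]) hfch.1 hfch.2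
      refine ⟨?_, this.2⟩
      rw [this.1, hb.1]
      have : |f ch - cur| = ((max cur (f ch) - min cur (f ch)).toNat : Int) := by
        rcases le_total cur (f ch) with h | h
        · rw [abs_of_nonneg (by omega)]; omega
        · rw [abs_of_nonpos (by omega)]; omega
      rw [this]; ring

theorem foldl_add_eq_sum (l : List Int) : l.foldl (· + ·) 0 = l.sum := by
  simp [List.sum_eq_foldl]

-- ===== VERDICT (by name: the statement is the Claim_ definition above) =====
theorem navigate_research_station_spec : Claim_equal_navigate_research_station := by
  intro layout obs _ _
  unfold Spec_navigate_research_station navigate_research_station navigate_research_station_alt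
  by_cases h : layout = []
  · simp [h]
  · simp only [h, if_false]
    set f : Char → Int := fun ch => (pvBuildPos layout).getD (String.ofList [ch]) 0 with hf
    have hfb : ∀ ch, 0 ≤ f ch ∧ f ch < 26 := fun ch => pos_bound layout _
    have hB := foldB_eq_pairSum f hfb obs.toList (List.replicate 25 0) 0 (by simp) le_rfl (by omega)
    have hA : (obs.toList.foldl (fun (s : Int × Int) ch => (s.1 + |f ch - s.2|, f ch)) (0, 0)).1
        = 0 + pairSum 0 (obs.toList.map f) := by
      rw [← List.foldl_map (f := f)
        (g := fun (s : Int × Int) (x : Int) => (s.1 + |x - s.2|, x)), foldA_eq_pairSum]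
    rw [foldl_add_eq_sum, hB.1, hA]
    simp
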